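-- pv_equiv track=rewrite | github.com/kimyoonduk/nyt-puzzle-solver | archived/strands_archived.py | filter_words_by_valid_sequences
-- ===== SOURCE A (Python) =====
-- DIRECTIONS_8 = [(-1, 0), (1, 0), (0, -1), (0, 1), (-1, -1), (-1, 1), (1, -1), (1, 1)]
--
-- def get_valid_sequences(matrix, length):
--     n = len(matrix)
--     m = len(matrix[0])
--     sequences = set()
--
--     def dfs(x, y, current_sequence):
--         if len(current_sequence) == length:
--             sequences.add(tuple(current_sequence))
--             return
--
--         for dx, dy in DIRECTIONS_8:
--             ni, nj = x + dx, y + dy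
--             if 0 <= ni < n and 0 <= nj < m:
--                 dfs(ni, nj, current_sequence + [matrix[ni][nj]])
--
--     for i in range(n):
--         for j in range(m):
--             dfs(i, j, [matrix[i][j]])
--
--     return sequences
--
-- def filter_words_by_valid_sequences(word_list, matrix, max_length=5):
--     filtered_words = word_list.copy()
--     for length in range(2, max_length + 1):  # Adjust the range as needed
--         current_valid_sequences = get_valid_sequences(matrix, length)
--         filtered_words = [
--             word
--             for word in filtered_words
--             if not any(
--                 tuple(word[i : i + length]) not in current_valid_sequences
--                 for i in range(len(word) - length + 1)
--             )
--         ]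
--     return filtered_words
-- ===== SOURCE B (Python) =====
-- DIRS_8 = [(-1, -1), (-1, 0), (-1, 1), (0, -1), (0, 1), (1, -1), (1, 0), (1, 1)]
--
-- def filter_words_by_valid_sequences(word_list, matrix, max_length=5):
--     n = len(matrix)
--     m = len(matrix[0]) if n else 0
--
--     def traceable(chars):
--         # reachability DP: cur = set of cells ending a path spelling the prefix seen so far
--         cur = {(i, j) for i in range(n) for j in range(m) if matrix[i][j] == chars[0]}
--         for ch in chars[1:]:
--             frontier = {(i + di, j + dj) for (i, j) in cur for (di, dj) in DIRS_8}
--             cur = {(i, j) for (i, j) in frontier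
--                    if 0 <= i < n and 0 <= j < m and matrix[i][j] == ch}
--             if not cur:
--                 return False
--         return bool(cur)
--
--     def ok(word):
--         for length in range(2, max_length + 1):
--             for s in range(len(word) - length + 1):
--                 if not traceable(word[s:s + length]):
--                     return False
--         return True
--
--     return [w for w in word_list if ok(w)]
-- ===== Notes on version B (the rewrite author's own statement) =====
-- stated objective: alternative
-- what changed: Instead of enumerating every 8-directional path of each length into a set of valid sequences and filtering words against that set, B checks each word window directly with a reachability DP over grid cells (frontier = cells that can end a path spelling the prefix of the window seen so far).
import Mathlib
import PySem

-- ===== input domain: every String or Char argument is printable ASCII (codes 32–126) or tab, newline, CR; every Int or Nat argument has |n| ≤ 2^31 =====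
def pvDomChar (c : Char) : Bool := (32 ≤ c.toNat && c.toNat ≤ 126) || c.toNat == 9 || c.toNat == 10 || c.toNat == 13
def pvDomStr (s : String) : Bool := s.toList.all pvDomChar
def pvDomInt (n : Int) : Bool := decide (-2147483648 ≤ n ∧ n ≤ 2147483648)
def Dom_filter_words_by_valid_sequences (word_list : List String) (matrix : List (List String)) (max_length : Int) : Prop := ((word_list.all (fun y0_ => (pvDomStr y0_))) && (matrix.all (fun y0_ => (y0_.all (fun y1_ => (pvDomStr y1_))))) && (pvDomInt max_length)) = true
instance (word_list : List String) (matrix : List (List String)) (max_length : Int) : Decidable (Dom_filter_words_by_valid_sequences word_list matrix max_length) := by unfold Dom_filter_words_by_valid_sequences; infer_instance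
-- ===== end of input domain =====

-- B replaces A's enumeration of all 8-directional grid sequences of each length by a per-window
-- reachability DP over grid cells; objective: alternative algorithm (same results, different strategy).

-- shared trivial helpers (both Pythons write matrix[i][j] and tuple(word[i:i+length])):
-- matrix[i][j]; used only with 0 ≤ i < len(matrix), 0 ≤ j < len(matrix[0]) ≤ len(row i) (Pre_), where getD is exact
def pvCell (matrix : List (List String)) (i j : Int) : String :=
  (matrix.getD i.toNat []).getD j.toNat ""

-- tuple(word[i:i+L]) : the window as the list of its one-character strings
def pvWindow (w : String) (i L : Int) : List String :=
  (PySem.Str.slice w (some i) (some (i + L))).toList.map (fun c => String.ofList [c])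

-- ===== PORT A =====
def pvDirections8 : List (Int × Int) := [(-1,0),(1,0),(0,-1),(0,1),(-1,-1),(-1,1),(1,-1),(1,1)]

-- the inner dfs of get_valid_sequences; fuel is a totality guard only (entry fuel L.toNat suffices
-- on every reachable call, since len(cur) grows by one towards L)
def pvDfs (matrix : List (List String)) (n m L : Int) (fuel : Nat) (x y : Int)
    (cur : List String) (seqs : PySem.Set (List String)) : PySem.Set (List String) :=
  if (cur.length : Int) = L then PySem.Set.add seqs cur
  else
    match fuel with
    | 0 => seqs
    | f + 1 =>
      pvDirections8.foldl (fun s d =>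
        let ni := x + d.1
        let nj := y + d.2
        if 0 ≤ ni ∧ ni < n ∧ 0 ≤ nj ∧ nj < m then
          pvDfs matrix n m L f ni nj (cur ++ [pvCell matrix ni nj]) s
        else s) seqs

-- get_valid_sequences(matrix, length); matrix[0] is matrix.headI (Pre_ gives matrix ≠ [] whenever called)
def pvGetValidSequences (matrix : List (List String)) (L : Int) : PySem.Set (List String) :=
  let n : Int := PySem.List.len matrix
  let m : Int := PySem.List.len matrix.headI
  (PySem.List.pyRange 0 n 1).foldl (fun s i =>
    (PySem.List.pyRange 0 m 1).foldl (fun s j =>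
      pvDfs matrix n m L L.toNat i j [pvCell matrix i j] s) s)
    PySem.Set.empty

def filter_words_by_valid_sequences (word_list : List String) (matrix : List (List String)) (max_length : Int) : List String :=
  (PySem.List.pyRange 2 (max_length + 1) 1).foldl (fun filtered L =>
    let seqs := pvGetValidSequences matrix L
    filtered.filter (fun word =>
      !((PySem.List.pyRange 0 (PySem.Str.len word - L + 1) 1).any (fun i =>
        !(PySem.Set.contains seqs (pvWindow word i L))))))
    word_list

-- ===== PORT B =====
def pvDirs8Alt : List (Int × Int) := [(-1,-1),(-1,0),(-1,1),(0,-1),(0,1),(1,-1),(1,0),(1,1)]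

-- {(i,j) for i in range(n) for j in range(m) if matrix[i][j] == c}
def pvMatches (matrix : List (List String)) (n m : Int) (c : String) : PySem.Set (Int × Int) :=
  (PySem.List.pyRange 0 n 1).foldl (fun s i =>
    (PySem.List.pyRange 0 m 1).foldl (fun s j =>
      if pvCell matrix i j = c then PySem.Set.add s (i, j) else s) s)
    PySem.Set.empty

-- {(i+di, j+dj) for (i,j) in cur for (di,dj) in DIRS_8}
def pvFrontier (cur : PySem.Set (Int × Int)) : PySem.Set (Int × Int) :=
  cur.foldl (fun s p =>
    pvDirs8Alt.foldl (fun s d => PySem.Set.add s (p.1 + d.1, p.2 + d.2)) s)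
    PySem.Set.empty

-- the 'for ch in chars[1:]' loop with its early return, then 'return bool(cur)'
def pvTrace (matrix : List (List String)) (n m : Int) :
    List String → PySem.Set (Int × Int) → Bool
  | [], cur => !cur.isEmpty
  | ch :: rest, cur =>
    let cur' : PySem.Set (Int × Int) :=
      (pvFrontier cur).foldl (fun s p =>
        if (0 ≤ p.1 ∧ p.1 < n ∧ 0 ≤ p.2 ∧ p.2 < m) ∧ pvCell matrix p.1 p.2 = ch
        then PySem.Set.add s p else s)
        PySem.Set.empty
    if cur'.isEmpty then false else pvTrace matrix n m rest cur'

-- traceable(chars); chars is always a window of length ≥ 2, so chars[0] is chars.headI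
def pvTraceable (matrix : List (List String)) (n m : Int) (chars : List String) : Bool :=
  pvTrace matrix n m chars.tail (pvMatches matrix n m chars.headI)

def filter_words_by_valid_sequences_alt (word_list : List String) (matrix : List (List String)) (max_length : Int) : List String :=
  let n : Int := PySem.List.len matrix
  let m : Int := if matrix.length ≠ 0 then PySem.List.len matrix.headI else 0
  word_list.filter (fun w =>
    (PySem.List.pyRange 2 (max_length + 1) 1).all (fun L =>
      (PySem.List.pyRange 0 (PySem.Str.len w - L + 1) 1).all (fun s =>
        pvTraceable matrix n m (pvWindow w s L))))

-- ===== PRECONDITION & SPEC =====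
-- Pre_ excludes exactly the inputs where Python A raises IndexError: when the length loop runs
-- (max_length ≥ 2), A reads matrix[0] (empty matrix) and matrix[i][j] for every i < len(matrix),
-- j < len(matrix[0]) (a row shorter than the first row).
def Pre_filter_words_by_valid_sequences (word_list : List String) (matrix : List (List String)) (max_length : Int) : Prop :=
  2 ≤ max_length → (matrix ≠ [] ∧ ∀ row ∈ matrix, matrix.headI.length ≤ row.length)
instance (word_list : List String) (matrix : List (List String)) (max_length : Int) : Decidable (Pre_filter_words_by_valid_sequences word_list matrix max_length) := by unfold Pre_filter_words_by_valid_sequences; infer_instance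

def pvWitness_filter_words_by_valid_sequences : List String × List (List String) × Int :=
  (["ab", "ba", "aa", "x", ""], [["a", "b"], ["b", "a"]], 3)

def Spec_filter_words_by_valid_sequences (word_list : List String) (matrix : List (List String)) (max_length : Int) (out : List String) : Prop := out = filter_words_by_valid_sequences_alt word_list matrix max_length
instance (word_list : List String) (matrix : List (List String)) (max_length : Int) (out : List String) : Decidable (Spec_filter_words_by_valid_sequences word_list matrix max_length out) := by unfold Spec_filter_words_by_valid_sequences; infer_instance

-- ===== CLAIM (what is proved, stated in full; the proofs are below) =====
def Claim_equal_filter_words_by_valid_sequences : Prop := ∀ (word_list : List String) (matrix : List (List String)) (max_length : Int), Dom_filter_words_by_valid_sequences word_list matrix max_length → Pre_filter_words_by_valid_sequences word_list matrix max_length → Spec_filter_words_by_valid_sequences word_list matrix max_length (filter_words_by_valid_sequences word_list matrix max_length)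

-- ===== LEMMAS AND PROOFS =====

-- (i,j) is inside the n×m grid
def pvInB (n m : Int) (p : Int × Int) : Prop := 0 ≤ p.1 ∧ p.1 < n ∧ 0 ≤ p.2 ∧ p.2 < m

-- "from cell (x,y) there is an 8-adjacent continuation path inside the grid spelling cs"
def pvCont (matrix : List (List String)) (n m : Int) : Int → Int → List String → Prop
  | _, _, [] => True
  | x, y, c :: cs => ∃ d ∈ pvDirections8, pvInB n m (x + d.1, y + d.2) ∧
      pvCell matrix (x + d.1) (y + d.2) = c ∧ pvCont matrix n m (x + d.1) (y + d.2) cs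

-- membership through a fold whose step adds "v ∈ s ∨ Q d"
theorem pv_mem_foldl_step {α γ : Type} (v : γ) (l : List α) (step : List γ → α → List γ)
    (Q : α → Prop) (h : ∀ s d, d ∈ l → (v ∈ step s d ↔ v ∈ s ∨ Q d)) :
    ∀ s, v ∈ l.foldl step s ↔ v ∈ s ∨ ∃ d ∈ l, Q d := by
  induction l with
  | nil => intro s; simp
  | cons a l ih =>
    intro s
    rw [List.foldl_cons, ih (fun s d hd => h s d (List.mem_cons_of_mem a hd)),
      h s a (List.mem_cons_self)]
    simp only [List.mem_cons]
    constructor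
    · rintro ((hs | hq) | ⟨d, hd, hq⟩)
      · exact Or.inl hs
      · exact Or.inr ⟨a, Or.inl rfl, hq⟩
      · exact Or.inr ⟨d, Or.inr hd, hq⟩
    · rintro (hs | ⟨d, (rfl | hd), hq⟩)
      · exact Or.inl (Or.inl hs)
      · exact Or.inl (Or.inr hq)
      · exact Or.inr ⟨d, hd, hq⟩

theorem pvDfs_mem (matrix : List (List String)) (n m L : Int) (hL : 0 < L) (v : List String) :
    ∀ (fuel : Nat) (x y : Int) (cur : List String) (seqs : PySem.Set (List String)),
    cur.length ≤ L.toNat → L.toNat ≤ cur.length + fuel →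
    (v ∈ pvDfs matrix n m L fuel x y cur seqs ↔
      v ∈ seqs ∨ ∃ t, t.length = L.toNat - cur.length ∧ pvCont matrix n m x y t ∧ v = cur ++ t) := by
  intro fuel
  induction fuel with
  | zero =>
    intro x y cur seqs hle hge
    have hcl : cur.length = L.toNat := by omega
    have hc : (cur.length : Int) = L := by omega
    rw [pvDfs, if_pos hc, PySem.Set.mem_add]
    constructor
    · rintro (hs | rfl)
      · exact Or.inl hs
      · exact Or.inr ⟨[], by simp [hcl], trivial, by simp⟩
    · rintro (hs | ⟨t, ht, _, rfl⟩)
      · exact Or.inl hs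
      · have : t = [] := by
          have : t.length = 0 := by omega
          exact List.length_eq_zero_iff.mp this
        subst this; simp
  | succ f ih =>
    intro x y cur seqs hle hge
    by_cases hc : (cur.length : Int) = L
    · have hcl : cur.length = L.toNat := by omega
      rw [pvDfs, if_pos hc, PySem.Set.mem_add]
      constructor
      · rintro (hs | rfl)
        · exact Or.inl hs
        · exact Or.inr ⟨[], by simp [hcl], trivial, by simp⟩
      · rintro (hs | ⟨t, ht, _, rfl⟩)
        · exact Or.inl hs
        · have : t = [] := by
            have : t.length = 0 := by omega
            exact List.length_eq_zero_iff.mp this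
          subst this; simp
    · have hlt : cur.length < L.toNat := by
        rcases lt_or_eq_of_le hle with h | h
        · exact h
        · exact absurd (by omega : (cur.length : Int) = L) hc
      rw [pvDfs, if_neg hc]
      rw [pv_mem_foldl_step v pvDirections8 _
        (fun d => pvInB n m (x + d.1, y + d.2) ∧ ∃ t', t'.length = L.toNat - cur.length - 1 ∧
          pvCont matrix n m (x + d.1) (y + d.2) t' ∧
          v = cur ++ (pvCell matrix (x + d.1) (y + d.2) :: t'))
        ?_ seqs]
      · constructor
        · rintro (hs | ⟨d, hd, hin, t', hlen', hcont, rfl⟩)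
          · exact Or.inl hs
          · refine Or.inr ⟨pvCell matrix (x + d.1) (y + d.2) :: t', by simp; omega, ?_, rfl⟩
            exact ⟨d, hd, hin, rfl, hcont⟩
        · rintro (hs | ⟨t, hlen', hcont, rfl⟩)
          · exact Or.inl hs
          · rcases t with _ | ⟨c, t'⟩
            · exfalso; simp at hlen'; omega
            · obtain ⟨d, hd, hin, hcell, hcont'⟩ := hcont
              subst hcell
              refine Or.inr ⟨d, hd, hin, t', by simp at hlen' ⊢; omega, hcont', rfl⟩
      · intro s d _
        by_cases hin : 0 ≤ x + d.1 ∧ x + d.1 < n ∧ 0 ≤ y + d.2 ∧ y + d.2 < m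
        · simp only [if_pos hin]
          rw [ih (x + d.1) (y + d.2) (cur ++ [pvCell matrix (x + d.1) (y + d.2)]) s
            (by simp; omega) (by simp; omega)]
          simp only [List.length_append, List.length_cons, List.length_nil, List.append_assoc,
            List.cons_append, List.nil_append]
          constructor
          · rintro (hs | ⟨t', h1, h2, h3⟩)
            · exact Or.inl hs
            · exact Or.inr ⟨hin, t', by omega, h2, h3⟩
          · rintro (hs | ⟨_, t', h1, h2, h3⟩)
            · exact Or.inl hs
            · exact Or.inr ⟨t', by omega, h2, h3⟩
        · simp only [if_neg hin]
          constructor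
          · exact Or.inl
          · rintro (hs | ⟨hin', _⟩)
            · exact hs
            · exact absurd hin' hin

theorem pvGVS_mem (matrix : List (List String)) (L : Int) (hL : 0 < L) (v : List String) :
    v ∈ pvGetValidSequences matrix L ↔
      ∃ p : Int × Int, pvInB (matrix.length : Int) (matrix.headI.length : Int) p ∧
        ∃ t, t.length = L.toNat - 1 ∧ pvCont matrix (matrix.length : Int) (matrix.headI.length : Int) p.1 p.2 t ∧
          v = pvCell matrix p.1 p.2 :: t := by
  unfold pvGetValidSequences
  simp only [PySem.List.len_eq]
  rw [pv_mem_foldl_step v _ _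
    (fun i => ∃ j ∈ PySem.List.pyRange 0 (matrix.headI.length : Int) 1,
      ∃ t, t.length = L.toNat - 1 ∧
        pvCont matrix (matrix.length : Int) (matrix.headI.length : Int) i j t ∧
        v = pvCell matrix i j :: t)
    ?_ PySem.Set.empty]
  · constructor
    · rintro (hs | ⟨i, hi, j, hj, t, h1, h2, h3⟩)
      · cases hs
      · rw [PySem.List.mem_pyRange_one] at hi hj
        exact ⟨(i, j), ⟨hi.1, hi.2, hj.1, hj.2⟩, t, h1, h2, h3⟩
    · rintro ⟨⟨i, j⟩, ⟨h1, h2, h3, h4⟩, t, ht⟩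
      exact Or.inr ⟨i, PySem.List.mem_pyRange_one.mpr ⟨h1, h2⟩, j,
        PySem.List.mem_pyRange_one.mpr ⟨h3, h4⟩, t, ht⟩
  · intro s i _
    rw [pv_mem_foldl_step v _ _
      (fun j => ∃ t, t.length = L.toNat - 1 ∧
        pvCont matrix (matrix.length : Int) (matrix.headI.length : Int) i j t ∧
        v = pvCell matrix i j :: t)
      ?_ s]
    intro s' j _
    rw [pvDfs_mem matrix _ _ L hL v L.toNat i j [pvCell matrix i j] s'
      (by simp; omega) (by simp)]
    simp only [List.length_cons, List.length_nil, List.singleton_append]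

theorem pvMatches_mem (matrix : List (List String)) (n m : Int) (c : String) (p : Int × Int) :
    p ∈ pvMatches matrix n m c ↔ pvInB n m p ∧ pvCell matrix p.1 p.2 = c := by
  unfold pvMatches
  rw [pv_mem_foldl_step p _ _
    (fun i => ∃ j ∈ PySem.List.pyRange 0 m 1, pvCell matrix i j = c ∧ p = (i, j))
    ?_ PySem.Set.empty]
  · constructor
    · rintro (hs | ⟨i, hi, j, hj, hc, rfl⟩)
      · cases hs
      · rw [PySem.List.mem_pyRange_one] at hi hj
        exact ⟨⟨hi.1, hi.2, hj.1, hj.2⟩, hc⟩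
    · rintro ⟨⟨h1, h2, h3, h4⟩, hc⟩
      exact Or.inr ⟨p.1, PySem.List.mem_pyRange_one.mpr ⟨h1, h2⟩, p.2,
        PySem.List.mem_pyRange_one.mpr ⟨h3, h4⟩, hc, rfl⟩
  · intro s i _
    rw [pv_mem_foldl_step p _ _ (fun j => pvCell matrix i j = c ∧ p = (i, j)) ?_ s]
    intro s' j _
    by_cases hc : pvCell matrix i j = c
    · rw [if_pos hc, PySem.Set.mem_add]
      tauto
    · rw [if_neg hc]
      tauto

theorem pvFrontier_mem (cur : PySem.Set (Int × Int)) (q : Int × Int) :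
    q ∈ pvFrontier cur ↔ ∃ p ∈ cur, ∃ d ∈ pvDirs8Alt, q = (p.1 + d.1, p.2 + d.2) := by
  unfold pvFrontier
  rw [pv_mem_foldl_step q _ _
    (fun p => ∃ d ∈ pvDirs8Alt, q = (p.1 + d.1, p.2 + d.2)) ?_ PySem.Set.empty]
  · constructor
    · rintro (hs | h)
      · cases hs
      · exact h
    · exact Or.inr
  · intro s p _
    rw [pv_mem_foldl_step q _ _ (fun d => q = (p.1 + d.1, p.2 + d.2)) ?_ s]
    intro s' d _
    rw [PySem.Set.mem_add]

theorem pvDirs_agree (d : Int × Int) : d ∈ pvDirs8Alt ↔ d ∈ pvDirections8 := by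
  simp [pvDirs8Alt, pvDirections8]; tauto

theorem pvTrace_iff (matrix : List (List String)) (n m : Int) :
    ∀ (cs : List String) (cur : PySem.Set (Int × Int)),
      pvTrace matrix n m cs cur = true ↔ ∃ p ∈ cur, pvCont matrix n m p.1 p.2 cs := by
  intro cs
  induction cs with
  | nil =>
    intro cur
    rw [pvTrace]
    constructor
    · intro h
      have hne : cur ≠ [] := by simpa [List.isEmpty_iff] using h
      obtain ⟨p, hp⟩ := List.exists_mem_of_ne_nil cur hne
      exact ⟨p, hp, trivial⟩
    · rintro ⟨p, hp, -⟩
      simp [List.ne_nil_of_mem hp]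
  | cons ch rest ih =>
    intro cur
    rw [pvTrace]
    have hmem : ∀ q : Int × Int,
        q ∈ (pvFrontier cur).foldl (fun s p =>
          if (0 ≤ p.1 ∧ p.1 < n ∧ 0 ≤ p.2 ∧ p.2 < m) ∧ pvCell matrix p.1 p.2 = ch
          then PySem.Set.add s p else s) PySem.Set.empty ↔
        (∃ p ∈ cur, ∃ d ∈ pvDirs8Alt, q = (p.1 + d.1, p.2 + d.2)) ∧
          pvInB n m q ∧ pvCell matrix q.1 q.2 = ch := by
      intro q
      rw [pv_mem_foldl_step q _ _
        (fun p => ((0 ≤ p.1 ∧ p.1 < n ∧ 0 ≤ p.2 ∧ p.2 < m) ∧ pvCell matrix p.1 p.2 = ch) ∧ q = p)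
        ?_ PySem.Set.empty]
      · constructor
        · rintro (hs | ⟨p, hp, ⟨hin, hc⟩, heq⟩)
          · cases hs
          · rw [heq]
            exact ⟨(pvFrontier_mem cur p).mp hp, hin, hc⟩
        · rintro ⟨hfr, hin, hc⟩
          exact Or.inr ⟨q, (pvFrontier_mem cur q).mpr hfr, ⟨hin, hc⟩, rfl⟩
      · intro s p _
        by_cases hcnd : (0 ≤ p.1 ∧ p.1 < n ∧ 0 ≤ p.2 ∧ p.2 < m) ∧ pvCell matrix p.1 p.2 = ch
        · rw [if_pos hcnd, PySem.Set.mem_add]; tauto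
        · rw [if_neg hcnd]; tauto
    have key : (∃ q ∈ (pvFrontier cur).foldl (fun s p =>
          if (0 ≤ p.1 ∧ p.1 < n ∧ 0 ≤ p.2 ∧ p.2 < m) ∧ pvCell matrix p.1 p.2 = ch
          then PySem.Set.add s p else s) PySem.Set.empty,
          pvCont matrix n m q.1 q.2 rest) ↔
        ∃ p ∈ cur, pvCont matrix n m p.1 p.2 (ch :: rest) := by
      constructor
      · rintro ⟨q, hq, hcont⟩
        obtain ⟨⟨p, hp, d, hd, rfl⟩, hin, hc⟩ := (hmem q).mp hq
        exact ⟨p, hp, d, (pvDirs_agree d).mp hd, hin, hc, hcont⟩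
      · rintro ⟨p, hp, d, hd, hin, hc, hcont⟩
        exact ⟨(p.1 + d.1, p.2 + d.2),
          (hmem _).mpr ⟨⟨p, hp, d, (pvDirs_agree d).mpr hd, rfl⟩, hin, hc⟩, hcont⟩
    by_cases hemp : ((pvFrontier cur).foldl (fun s p =>
        if (0 ≤ p.1 ∧ p.1 < n ∧ 0 ≤ p.2 ∧ p.2 < m) ∧ pvCell matrix p.1 p.2 = ch
        then PySem.Set.add s p else s) PySem.Set.empty).isEmpty
    · simp only [hemp, if_true]
      rw [List.isEmpty_iff] at hemp
      constructor
      · intro h; cases h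
      · intro h
        obtain ⟨q, hq, _⟩ := key.mpr h
        rw [hemp] at hq
        cases hq
    · simp only [hemp, if_false]
      rw [ih]
      exact key

-- congruence for List.all over the members (specific fold-shape congruence for the two ports)
theorem pv_all_congr {α : Type} (l : List α) (f g : α → Bool) (h : ∀ x ∈ l, f x = g x) :
    l.all f = l.all g := by
  induction l with
  | nil => rfl
  | cons a l ih =>
    simp only [List.all_cons, h a List.mem_cons_self,
      ih (fun x hx => h x (List.mem_cons_of_mem a hx))]

-- a window taken with i ≥ 0 and i + L ≤ len(w) has exactly L characters
theorem pvWindow_len (w : String) (i L : Int) (h0 : 0 ≤ i) (hL : 0 ≤ L)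
    (hle : i + L ≤ (w.toList.length : Int)) : (pvWindow w i L).length = L.toNat := by
  unfold pvWindow
  rw [List.length_map, PySem.Str.toList_slice]
  rw [PySem.Chars.slice_eq_listSlice, PySem.List.slice_toNat _ h0 (by omega),
    List.length_take, List.length_drop]
  omega

-- the per-window equivalence: membership in A's sequence set = B's DP verdict
theorem pvWindow_equiv (matrix : List (List String)) (L : Int) (hL : 2 ≤ L)
    (ws : List String) (hlen : ws.length = L.toNat) :
    PySem.Set.contains (pvGetValidSequences matrix L) ws
      = pvTraceable matrix (matrix.length : Int) (matrix.headI.length : Int) ws := by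
  rcases ws with _ | ⟨c0, cs⟩
  · simp at hlen; omega
  · rw [Bool.eq_iff_iff, PySem.Set.contains_iff, pvGVS_mem matrix L (by omega)]
    unfold pvTraceable
    simp only [List.tail_cons, List.headI]
    rw [pvTrace_iff]
    constructor
    · rintro ⟨p, hin, t, hlen', hcont, heq⟩
      injection heq with h1 h2
      subst h2
      exact ⟨p, (pvMatches_mem matrix _ _ c0 p).mpr ⟨hin, h1.symm⟩, hcont⟩
    · rintro ⟨p, hp, hcont⟩
      obtain ⟨hin, hc⟩ := (pvMatches_mem matrix _ _ c0 p).mp hp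
      exact ⟨p, hin, cs, by simp at hlen ⊢; omega, hcont, by rw [hc]⟩

-- repeated filtering over a list of lengths is one filter by the conjunction
theorem pv_foldl_filter (p : Int → String → Bool) :
    ∀ (Ls : List Int) (xs : List String),
      Ls.foldl (fun acc L => acc.filter (p L)) xs
        = xs.filter (fun w => Ls.all (fun L => p L w)) := by
  intro Ls
  induction Ls with
  | nil => intro xs; simp
  | cons L Ls ih =>
    intro xs
    rw [List.foldl_cons, ih, List.filter_filter]
    simp [Bool.and_comm]

-- ===== VERDICT (by name: the statement is the Claim_ definition above) =====
theorem filter_words_by_valid_sequences_spec : Claim_equal_filter_words_by_valid_sequences := by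
  unfold Claim_equal_filter_words_by_valid_sequences
  intro word_list matrix max_length _ _
  unfold Spec_filter_words_by_valid_sequences
  unfold filter_words_by_valid_sequences filter_words_by_valid_sequences_alt
  simp only [PySem.List.len_eq]
  rw [pv_foldl_filter]
  have hm : (if matrix.length ≠ 0 then (matrix.headI.length : Int) else 0)
      = (matrix.headI.length : Int) := by
    rcases matrix with _ | ⟨r, rs⟩ <;> simp
  rw [hm]
  apply List.filter_congr
  intro w _
  apply pv_all_congr
  intro L hLmem
  rw [PySem.List.mem_pyRange_one] at hLmem
  have hpt : ∀ i ∈ PySem.List.pyRange 0 (PySem.Str.len w - L + 1) 1,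
      (!(PySem.Set.contains (pvGetValidSequences matrix L) (pvWindow w i L)))
        = (!(pvTraceable matrix (matrix.length : Int) (matrix.headI.length : Int) (pvWindow w i L))) := by
    intro i hi
    rw [PySem.List.mem_pyRange_one] at hi
    have hlw : PySem.Str.len w = (w.toList.length : Int) := by simp
    rw [pvWindow_equiv matrix L (by omega) (pvWindow w i L)
      (pvWindow_len w i L hi.1 (by omega) (by rw [← hlw]; omega))]
  rw [PySem.List.any_congr_mem hpt, ← List.not_all_eq_any_not, Bool.not_not]
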